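-- pv_equiv track=rewrite | github.com/kzdxblord/botbattle | my_submission.py | get_territory_continent
-- ===== SOURCE A (Python) =====
-- def get_territory_continent(territory_id: int) -> str:
--     """Get the continent of a territory."""
--     continent_map = {
--         'NA': range(0, 9),
--         'EU': range(9, 16),
--         'AS': range(16, 28),
--         'AF': range(32, 38),
--         'AU': range(38, 42),
--         'SA': range(28, 32)
--     }
--     for continent, territory_range in continent_map.items():
--         if territory_id in territory_range:
--             return continent
--     raise ValueError(f"Invalid territory ID: {territory_id}")
-- ===== SOURCE B (Python) =====
-- _CONTINENT_TABLE = {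
--     tid: continent
--     for continent, territory_range in [
--         ('NA', range(0, 9)),
--         ('EU', range(9, 16)),
--         ('AS', range(16, 28)),
--         ('AF', range(32, 38)),
--         ('AU', range(38, 42)),
--         ('SA', range(28, 32)),
--     ]
--     for tid in territory_range
-- }
--
--
-- def get_territory_continent(territory_id: int) -> str:
--     """Get the continent of a territory."""
--     try:
--         return _CONTINENT_TABLE[territory_id]
--     except (KeyError, TypeError):
--         raise ValueError(f"Invalid territory ID: {territory_id}")
-- ===== Notes on version B (the rewrite author's own statement) =====
-- stated objective: alternative
-- what changed: A scans six (continent, range) pairs testing range membership per call; B precomputes once a flat dict keyed by every valid integer id and does a single hash lookup, raising the identical ValueError on a missing key.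
import Mathlib
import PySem

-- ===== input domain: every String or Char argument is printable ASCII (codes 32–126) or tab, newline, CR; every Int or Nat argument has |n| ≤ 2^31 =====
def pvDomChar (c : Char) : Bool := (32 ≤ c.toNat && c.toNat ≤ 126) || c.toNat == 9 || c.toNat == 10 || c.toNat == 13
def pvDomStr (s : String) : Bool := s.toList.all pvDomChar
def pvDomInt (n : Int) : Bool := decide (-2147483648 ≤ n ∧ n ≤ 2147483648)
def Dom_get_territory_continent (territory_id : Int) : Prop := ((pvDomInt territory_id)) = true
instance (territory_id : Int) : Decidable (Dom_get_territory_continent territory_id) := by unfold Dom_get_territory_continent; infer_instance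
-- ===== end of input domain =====

set_option maxRecDepth 4000


-- B replaces A's per-call scan over six (continent, range) pairs with a flat lookup
-- table keyed by every valid integer id, built once from the same six ranges (objective: alternative).

-- ===== PORT A =====
-- A's continent_map as a list of (continent, (lo, hi)) with 'territory_id in range(lo,hi)' = lo ≤ id < hi.
def pvContinentMapA : List (String × (Int × Int)) :=
  [("NA", (0, 9)), ("EU", (9, 16)), ("AS", (16, 28)), ("AF", (32, 38)), ("AU", (38, 42)), ("SA", (28, 32))]

-- the for-loop over continent_map.items(); none = the final 'raise ValueError'
def pvScanA (territory_id : Int) : List (String × (Int × Int)) → Option String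
  | [] => none
  | (continent, lo, hi) :: rest =>
      if lo ≤ territory_id ∧ territory_id < hi then some continent
      else pvScanA territory_id rest

def get_territory_continent (territory_id : Int) : String :=
  (pvScanA territory_id pvContinentMapA).getD ""

-- ===== PORT B =====
-- _CONTINENT_TABLE: dict built once by inserting every id of each range
def pvContinentTable : PySem.Dict Int String :=
  [("NA", (0 : Int), (9 : Int)), ("EU", 9, 16), ("AS", 16, 28), ("AF", 32, 38), ("AU", 38, 42), ("SA", 28, 32)].foldl
    (fun d (e : String × Int × Int) =>
      (PySem.List.pyRange e.2.1 e.2.2 1).foldl (fun d tid => d.insert tid e.1) d)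
    PySem.Dict.empty

def get_territory_continent_alt (territory_id : Int) : String :=
  (pvContinentTable.get? territory_id).getD ""

-- ===== PRECONDITION & SPEC =====
-- A raises ValueError for ids outside all six ranges, i.e. unless 0 ≤ id < 42.
def Pre_get_territory_continent (territory_id : Int) : Prop :=
  0 ≤ territory_id ∧ territory_id < 42
instance (territory_id : Int) : Decidable (Pre_get_territory_continent territory_id) := by unfold Pre_get_territory_continent; infer_instance
def pvWitness_get_territory_continent : Int := (17)

def Spec_get_territory_continent (territory_id : Int) (out : String) : Prop := out = get_territory_continent_alt territory_id
instance (territory_id : Int) (out : String) : Decidable (Spec_get_territory_continent territory_id out) := by unfold Spec_get_territory_continent; infer_instance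

-- ===== CLAIM (what is proved, stated in full; the proofs are below) =====
def Claim_equal_get_territory_continent : Prop := ∀ (territory_id : Int), Dom_get_territory_continent territory_id → Pre_get_territory_continent territory_id → Spec_get_territory_continent territory_id (get_territory_continent territory_id)

-- ===== LEMMAS AND PROOFS =====

-- ===== VERDICT (by name: the statement is the Claim_ definition above) =====
theorem get_territory_continent_spec : Claim_equal_get_territory_continent := by
  intro tid _ hpre
  obtain ⟨h0, h1⟩ := hpre
  unfold Spec_get_territory_continent
  interval_cases tid <;> decide
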